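-- pv_equiv track=rewrite | github.com/shivk012/advent_of_code | 2021/8/main.py | part_1
-- ===== SOURCE A (Python) =====
-- from collections import Counter
--
-- def get_digit(output_value):
--     l = len(output_value)
--     if l == 2:
--         return 1
--     elif l == 3:
--         return 7
--     elif l == 4:
--         return 4
--     elif l == 7:
--         return 8
--     else:
--         return 0
--
-- def part_1(data):
--     all_digits = " ".join([line.split("|")[1].strip() for line in data]).strip()
--     all_digits_count = Counter(get_digit(x) for x in all_digits.split())
--
--     return (
--         all_digits_count[1]
--         + all_digits_count[4]
--         + all_digits_count[7]
--         + all_digits_count[8]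
--     )
-- ===== SOURCE B (Python) =====
-- def part_1(data):
--     total = 0
--     for line in data:
--         cur = 0
--         for ch in line.split("|")[1]:
--             if ch.isspace():
--                 if cur in (2, 3, 4, 7):
--                     total += 1
--                 cur = 0
--             else:
--                 cur += 1
--         if cur in (2, 3, 4, 7):
--             total += 1
--     return total
-- ===== Notes on version B (the rewrite author's own statement) =====
-- stated objective: alternative
-- what changed: Replaces A's join-all-lines/split()/get_digit/Counter histogram pipeline with a character-level scan: a tiny state machine walks the segment after '|' once, tracking the current run length of non-space characters and bumping one running total whenever a run of length 2, 3, 4 or 7 ends, so no token list, digit map or histogram is ever built.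
import Mathlib
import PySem

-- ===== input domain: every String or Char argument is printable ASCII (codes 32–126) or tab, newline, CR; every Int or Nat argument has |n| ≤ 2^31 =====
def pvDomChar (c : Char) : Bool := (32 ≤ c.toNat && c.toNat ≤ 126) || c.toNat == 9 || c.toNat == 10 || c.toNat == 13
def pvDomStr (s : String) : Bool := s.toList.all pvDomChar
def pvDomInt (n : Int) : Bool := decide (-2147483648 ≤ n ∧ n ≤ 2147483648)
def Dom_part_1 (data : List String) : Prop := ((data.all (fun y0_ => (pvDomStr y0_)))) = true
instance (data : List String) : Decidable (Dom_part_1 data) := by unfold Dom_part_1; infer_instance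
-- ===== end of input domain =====

-- B replaces A's join/split()/get_digit/Counter pipeline by a character-level state
-- machine over the segment after '|': it tracks the current run length of non-space
-- characters and bumps one running total whenever a run of length 2, 3, 4 or 7 ends
-- (objective: alternative — no token list, digit map or histogram is built).

-- ===== PORT A =====
def get_digit (output_value : String) : Int :=
  let l := PySem.Str.len output_value
  if l = 2 then 1
  else if l = 3 then 7
  else if l = 4 then 4
  else if l = 7 then 8
  else 0

def part_1 (data : List String) : Int :=
  let all_digits : String :=
    PySem.Str.strip (PySem.Str.join " " (data.map (fun line =>
      match PySem.List.pyGet? ((PySem.Str.split? line "|").getD []) 1 with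
      | some s => PySem.Str.strip s
      | none => "")))            -- none = IndexError in Python; excluded by Pre_part_1
  let all_digits_count := PySem.Dict.counter ((PySem.Str.split₀ all_digits).map get_digit)
  all_digits_count.getD 1 0 + all_digits_count.getD 4 0
    + all_digits_count.getD 7 0 + all_digits_count.getD 8 0

-- ===== PORT B =====
def part_1_alt (data : List String) : Int :=
  data.foldl (fun total line =>
    match PySem.List.pyGet? ((PySem.Str.split? line "|").getD []) 1 with
    | some seg =>
        let p := seg.toList.foldl (fun (p : Int × Int) ch =>
          if PySem.Chars.isspace ch then
            if p.2 = 2 ∨ p.2 = 3 ∨ p.2 = 4 ∨ p.2 = 7 then (p.1 + 1, 0) else (p.1, 0)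
          else (p.1, p.2 + 1)) (total, 0)
        if p.2 = 2 ∨ p.2 = 3 ∨ p.2 = 4 ∨ p.2 = 7 then p.1 + 1 else p.1
    | none => total)             -- none = IndexError in Python; excluded by Pre_part_1
    0

-- ===== PRECONDITION & SPEC =====
-- Pre_ excludes exactly the inputs where some line has fewer than two '|'-separated
-- fields: there Python's line.split("|")[1] raises IndexError (in A and in B alike).
def Pre_part_1 (data : List String) : Prop :=
  ∀ line ∈ data, 2 ≤ ((PySem.Str.split? line "|").getD []).length

instance (data : List String) : Decidable (Pre_part_1 data) := by
  unfold Pre_part_1; infer_instance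

def pvWitness_part_1 : List String :=
  ["ab cdef | ab gcd eabcdfg", "a | bc"]

def Spec_part_1 (data : List String) (out : Int) : Prop := out = part_1_alt data
instance (data : List String) (out : Int) : Decidable (Spec_part_1 data out) := by
  unfold Spec_part_1; infer_instance

-- ===== CLAIM (what is proved, stated in full; the proofs are below) =====
def Claim_equal_part_1 : Prop :=
  ∀ (data : List String), Dom_part_1 data → Pre_part_1 data → Spec_part_1 data (part_1 data)

-- ===== LEMMAS AND PROOFS =====

-- B's per-character step and its end-of-segment flush, named for the proofs
def pvStep (p : Int × Int) (ch : Char) : Int × Int :=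
  if PySem.Chars.isspace ch then
    if p.2 = 2 ∨ p.2 = 3 ∨ p.2 = 4 ∨ p.2 = 7 then (p.1 + 1, 0) else (p.1, 0)
  else (p.1, p.2 + 1)

def pvFlush (p : Int × Int) : Int :=
  if p.2 = 2 ∨ p.2 = 3 ∨ p.2 = 4 ∨ p.2 = 7 then p.1 + 1 else p.1

-- the easy-token count of a token list, as an integer
def pvC (ts : List (List Char)) : Int :=
  (ts.countP (fun t => decide (t.length = 2 ∨ t.length = 3 ∨ t.length = 4 ∨ t.length = 7)) : Int)

theorem pvC_append (xs ys : List (List Char)) : pvC (xs ++ ys) = pvC xs + pvC ys := by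
  simp [pvC, List.countP_append]

theorem pvC_flatMap {A : Type} (l : List A) (f : A → List (List Char)) :
    pvC (l.flatMap f) = (l.map (fun x => pvC (f x))).sum := by
  induction l with
  | nil => simp [pvC]
  | cons a l ih => simp only [List.flatMap_cons, pvC_append, List.map_cons, List.sum_cons, ih]

theorem pvC_singleton (t : List Char) :
    pvC [t] = if (t.length : Int) = 2 ∨ (t.length : Int) = 3 ∨ (t.length : Int) = 4
        ∨ (t.length : Int) = 7 then 1 else 0 := by
  have hiff : ((t.length : Int) = 2 ∨ (t.length : Int) = 3 ∨ (t.length : Int) = 4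
      ∨ (t.length : Int) = 7) ↔ (t.length = 2 ∨ t.length = 3 ∨ t.length = 4 ∨ t.length = 7) := by
    omega
  rw [if_congr hiff rfl rfl]
  by_cases h : t.length = 2 ∨ t.length = 3 ∨ t.length = 4 ∨ t.length = 7 <;> simp [pvC, h]

-- the accumulator of split₀.go only ever gets reversed onto the front of the result
theorem split0_go_acc (xs : List Char) (cur : List Char) (acc : List (List Char)) :
    PySem.Chars.split₀.go xs cur acc = acc.reverse ++ PySem.Chars.split₀.go xs cur [] := by
  induction xs generalizing cur acc with
  | nil =>
      simp [PySem.Chars.split₀.go]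
      split_ifs <;> simp
  | cons c rest ih =>
      simp only [PySem.Chars.split₀.go]
      split_ifs with h1 h2
      · rw [ih [] acc]
      · rw [ih [] (cur.reverse :: acc), ih [] [cur.reverse]]
        simp
      · rw [ih (c :: cur) acc]

-- THE B-SIDE INVARIANT: the scan with current run length |cur| finishes with
-- the starting total plus the easy-token count of the tokens split₀.go still emits
theorem scan_go (cs : List Char) (cur : List Char) (tot : Int) :
    pvFlush (cs.foldl pvStep (tot, (cur.length : Int)))
      = tot + pvC (PySem.Chars.split₀.go cs cur []) := by
  induction cs generalizing cur tot with
  | nil =>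
      simp only [List.foldl_nil, pvFlush, PySem.Chars.split₀.go]
      by_cases h : cur.isEmpty = true
      · have : cur.length = 0 := by simpa [List.isEmpty_iff] using h
        simp [this, pvC]
      · simp only [h, Bool.false_eq_true, if_false, List.reverse_singleton]
        rw [pvC_singleton, List.length_reverse]
        split_ifs with h1 <;> ring
  | cons c rest ih =>
      simp only [List.foldl_cons, PySem.Chars.split₀.go, pvStep]
      by_cases hc : PySem.Chars.isspace c = true
      · simp only [hc, if_true]
        by_cases hcur : cur.isEmpty = true
        · have h0 : cur.length = 0 := by simpa [List.isEmpty_iff] using hcur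
          have : ¬ ((cur.length : Int) = 2 ∨ (cur.length : Int) = 3
              ∨ (cur.length : Int) = 4 ∨ (cur.length : Int) = 7) := by
            rw [h0]; push_cast; decide
          simp only [this, if_false, hcur, if_true]
          simpa using ih [] tot
        · simp only [hcur]
          rw [split0_go_acc rest [] [cur.reverse]]
          simp only [Bool.false_eq_true, if_false, List.reverse_singleton]
          have hC : pvC ([cur.reverse] ++ PySem.Chars.split₀.go rest [] [])
              = (if (cur.length : Int) = 2 ∨ (cur.length : Int) = 3
                  ∨ (cur.length : Int) = 4 ∨ (cur.length : Int) = 7 then 1 else 0)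
                + pvC (PySem.Chars.split₀.go rest [] []) := by
            rw [pvC_append, pvC_singleton, List.length_reverse]
          rw [hC]
          split_ifs with h1
          · have := ih [] (tot + 1)
            simp only [List.length_nil, Nat.cast_zero] at this ⊢
            rw [this]; ring
          · have := ih [] tot
            simp only [List.length_nil, Nat.cast_zero] at this ⊢
            rw [this]; ring
      · simp only [hc]
        have := ih (c :: cur) tot
        simp only [List.length_cons] at this
        rw [show ((cur.length : Int) + 1) = ((cur.length + 1 : Nat) : Int) by push_cast; ring]
        exact this

-- splitting at a whitespace character splits the whitespace-split into two
theorem split0_go_ws (c : Char) (hc : PySem.Chars.isspace c = true)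
    (xs ys : List Char) (cur : List Char) (acc : List (List Char)) :
    PySem.Chars.split₀.go (xs ++ c :: ys) cur acc =
      PySem.Chars.split₀.go xs cur acc ++ PySem.Chars.split₀.go ys [] [] := by
  induction xs generalizing cur acc with
  | nil =>
      simp only [List.nil_append, PySem.Chars.split₀.go, hc, if_true]
      by_cases h : cur.isEmpty = true
      · simp only [h, if_true]
        rw [split0_go_acc ys [] acc]
      · simp only [h]
        rw [split0_go_acc ys [] (cur.reverse :: acc)]
        simp
  | cons d rest ih =>
      simp only [List.cons_append, PySem.Chars.split₀.go]
      split_ifs with h1 h2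
      · exact ih [] acc
      · exact ih [] (cur.reverse :: acc)
      · exact ih (d :: cur) acc

theorem split0_append_ws (c : Char) (hc : PySem.Chars.isspace c = true) (xs ys : List Char) :
    PySem.Chars.split₀ (xs ++ c :: ys) =
      PySem.Chars.split₀ xs ++ PySem.Chars.split₀ ys :=
  split0_go_ws c hc xs ys [] []

theorem split0_lstrip (s : List Char) :
    PySem.Chars.split₀ (PySem.Chars.lstrip s) = PySem.Chars.split₀ s := by
  unfold PySem.Chars.lstrip
  induction s with
  | nil => rfl
  | cons c rest ih =>
      by_cases h : PySem.Chars.isspace c = true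
      · rw [List.dropWhile_cons_of_pos h, ih]
        show _ = PySem.Chars.split₀.go (c :: rest) [] []
        simp [PySem.Chars.split₀.go, h, PySem.Chars.split₀]
      · rw [List.dropWhile_cons_of_neg h]

theorem split0_append_allws (xs ws : List Char) (hw : ∀ c ∈ ws, PySem.Chars.isspace c = true) :
    PySem.Chars.split₀ (xs ++ ws) = PySem.Chars.split₀ xs := by
  induction ws generalizing xs with
  | nil => simp
  | cons c rest ih =>
      rw [split0_append_ws c (hw c (by simp)) xs rest]
      have h3 : PySem.Chars.split₀ rest = [] := by
        simpa using ih [] (fun d hd => hw d (List.mem_cons_of_mem _ hd))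
      rw [h3, List.append_nil]

theorem split0_rstrip (s : List Char) :
    PySem.Chars.split₀ (PySem.Chars.rstrip s) = PySem.Chars.split₀ s := by
  unfold PySem.Chars.rstrip
  conv_rhs => rw [show s = (s.reverse.dropWhile PySem.Chars.isspace).reverse
      ++ (s.reverse.takeWhile PySem.Chars.isspace).reverse from by
    rw [← List.reverse_append, List.takeWhile_append_dropWhile, List.reverse_reverse]]
  rw [split0_append_allws]
  intro c hc
  exact List.mem_takeWhile_imp (List.mem_reverse.mp hc)

theorem split0_strip (s : List Char) :
    PySem.Chars.split₀ (PySem.Chars.strip s) = PySem.Chars.split₀ s := by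
  unfold PySem.Chars.strip
  rw [split0_rstrip, split0_lstrip]

theorem split0_join (ls : List (List Char)) :
    PySem.Chars.split₀ (PySem.Chars.join [' '] ls) = ls.flatMap PySem.Chars.split₀ := by
  induction ls with
  | nil => rfl
  | cons a rest ih =>
      cases rest with
      | nil => simp [PySem.Chars.join, List.intercalate]
      | cons b rs =>
          have : PySem.Chars.join [' '] (a :: b :: rs) =
              a ++ ' ' :: PySem.Chars.join [' '] (b :: rs) := by
            simp [PySem.Chars.join, List.intercalate]
          rw [this, split0_append_ws ' ' (by decide) a _, ih]
          simp

-- counting the easy digits in the histogram = the easy-token count pvC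
theorem counts_eq (ts : List (List Char)) :
    (((ts.map String.ofList).map get_digit).count 1 : Int)
      + (((ts.map String.ofList).map get_digit).count 4 : Int)
      + (((ts.map String.ofList).map get_digit).count 7 : Int)
      + (((ts.map String.ofList).map get_digit).count 8 : Int)
    = pvC ts := by
  induction ts with
  | nil => simp [pvC]
  | cons t ts ih =>
      simp only [List.map_cons, List.count_cons, pvC, List.countP_cons] at *
      push_cast
      have key : (if (get_digit (String.ofList t) == 1) = true then (1:Int) else 0)
          + (if (get_digit (String.ofList t) == 4) = true then (1:Int) else 0)
          + (if (get_digit (String.ofList t) == 7) = true then (1:Int) else 0)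
          + (if (get_digit (String.ofList t) == 8) = true then (1:Int) else 0)
          = (if (decide (t.length = 2 ∨ t.length = 3 ∨ t.length = 4 ∨ t.length = 7)) = true
              then (1:Int) else 0) := by
        clear ih
        have hlen : PySem.Str.len (String.ofList t) = (t.length : Int) := by simp
        simp only [get_digit, hlen, beq_iff_eq, decide_eq_true_eq]
        split_ifs <;> omega
      linear_combination ih + key

-- ===== VERDICT (by name: the statement is the Claim_ definition above) =====
set_option maxHeartbeats 1000000 in
theorem part_1_spec : Claim_equal_part_1 := by
  intro data hdom hpre
  unfold Spec_part_1
  simp only [part_1]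
  set sA : String → String :=
    fun line => ((PySem.Str.split? line "|").getD [])[1]?.getD "" with hsA
  have hseg : ∀ line ∈ data,
      PySem.List.pyGet? ((PySem.Str.split? line "|").getD []) 1 = some (sA line) := by
    intro line hl
    have h2 := hpre line hl
    have h1 : PySem.List.pyGet? ((PySem.Str.split? line "|").getD []) 1
        = ((PySem.Str.split? line "|").getD [])[1]? := by
      simpa using PySem.List.pyGet?_natCast ((PySem.Str.split? line "|").getD []) 1
    rw [h1, List.getElem?_eq_getElem (by omega), hsA]
    simp [List.getElem?_eq_getElem (show 1 < ((PySem.Str.split? line "|").getD []).length by omega)]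
  -- B = sum over lines of the per-line easy-token count (via the scan invariant)
  have hB : part_1_alt data
      = (data.map (fun line => pvC (PySem.Chars.split₀ (sA line).toList))).sum := by
    unfold part_1_alt
    rw [PySem.List.foldl_congr_mem data _
      (fun total line => total + pvC (PySem.Chars.split₀ (sA line).toList)) 0
      (by
        intro acc line hl
        rw [hseg line hl]
        have := scan_go (sA line).toList [] acc
        simp only [List.length_nil, Nat.cast_zero] at this
        simpa [pvFlush, pvStep, PySem.Chars.split₀] using this)]
    rw [PySem.List.foldl_add]
    simp
  -- A = the same sum, via the Counter characterisation and the join/strip/split₀ algebra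
  have hmap : data.map (fun line =>
      match PySem.List.pyGet? ((PySem.Str.split? line "|").getD []) 1 with
      | some s => PySem.Str.strip s
      | none => "")
      = data.map (fun line => PySem.Str.strip (sA line)) := by
    refine List.map_congr_left (fun line hl => ?_)
    rw [hseg line hl]
  rw [hmap]
  rw [PySem.Dict.getD_counter, PySem.Dict.getD_counter, PySem.Dict.getD_counter,
    PySem.Dict.getD_counter]
  have htok : PySem.Str.split₀
      (PySem.Str.strip (PySem.Str.join " " (data.map (fun line => PySem.Str.strip (sA line)))))
      = (data.flatMap (fun line => PySem.Chars.split₀ (sA line).toList)).map String.ofList := by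
    unfold PySem.Str.split₀
    refine congrArg (List.map String.ofList) ?_
    rw [PySem.Str.toList_strip, split0_strip, PySem.Str.toList_join]
    have : (data.map (fun line => PySem.Str.strip (sA line))).map String.toList
        = data.map (fun line => PySem.Chars.strip (sA line).toList) := by
      simp [List.map_map, Function.comp, PySem.Str.toList_strip]
    rw [this]
    have hsp : " ".toList = [' '] := rfl
    rw [hsp, split0_join, List.flatMap_map]
    refine List.flatMap_congr (fun line _ => ?_)
    exact split0_strip _
  rw [htok, counts_eq, hB, pvC_flatMap]
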